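-- pv_equiv track=rewrite | github.com/KimGJHC/Data-Structure-Algorithem-learning | String/breakPalindrome.py | breakPalindrome_v1
-- ===== SOURCE A (Python) =====
-- def breakPalindrome_v1(palindrome):
--     n = len(palindrome)
--
--     if n <= 1:
--         return ""
--
--     if n % 2 == 0:
--         for i in range(n):
--             if palindrome[i] > 'a':
--                 return palindrome[:i] + 'a' + palindrome[i + 1:]
--     else:
--         mid = n // 2
--         for i in range(n):
--             if i == mid:
--                 continue
--             if palindrome[i] > 'a':
--                 return palindrome[:i] + 'a' + palindrome[i + 1:]
--     return palindrome[:-1] + 'b'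
-- ===== SOURCE B (Python) =====
-- def breakPalindrome_v1(palindrome):
--     n = len(palindrome)
--     if n <= 1:
--         return ""
--     skip = n // 2 if n % 2 else -1
--     cands = [palindrome[:i] + 'a' + palindrome[i + 1:]
--              for i, c in enumerate(palindrome) if i != skip and c > 'a']
--     return min(cands) if cands else palindrome[:-1] + 'b'
-- ===== Notes on version B (the rewrite author's own statement) =====
-- stated objective: alternative
-- what changed: Replaces A's parity-split first-match early-return scan by generate-and-select: B builds the list of all candidate strings obtained by lowering one eligible character to 'a' and returns their lexicographic minimum (falling back to palindrome[:-1]+'b' when the list is empty), correct because an earlier replacement position always yields a strictly smaller string.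
import Mathlib
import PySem

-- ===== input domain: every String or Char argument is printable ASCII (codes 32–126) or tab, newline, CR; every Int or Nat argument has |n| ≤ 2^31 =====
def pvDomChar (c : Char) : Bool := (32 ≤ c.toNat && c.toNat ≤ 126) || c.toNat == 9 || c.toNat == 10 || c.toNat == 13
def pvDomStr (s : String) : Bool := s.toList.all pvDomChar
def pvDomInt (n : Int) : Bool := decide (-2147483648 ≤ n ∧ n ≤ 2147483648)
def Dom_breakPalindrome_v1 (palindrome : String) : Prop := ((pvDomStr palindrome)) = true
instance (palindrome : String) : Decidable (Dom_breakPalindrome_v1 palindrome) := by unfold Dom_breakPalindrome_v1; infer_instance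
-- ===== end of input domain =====

-- B replaces A's first-match early-return scan by generate-and-select: it builds the list of ALL
-- one-char-to-'a' candidate strings and returns their minimum (alternative algorithm, same result
-- because an earlier replacement position always yields a lexicographically smaller string).

-- ===== PORT A =====
-- even-length loop: "for i in range(n): if palindrome[i] > 'a': return palindrome[:i]+'a'+palindrome[i+1:]";
-- falling out of the loop reaches "return palindrome[:-1] + 'b'"
def pvALoopE (cs : List Char) (i : Nat) : List Char :=
  if h : i < cs.length then
    if 'a' < cs[i] then
      PySem.List.slice cs none (some (i : Int)) ++ 'a' :: PySem.List.slice cs (some ((i : Int) + 1)) none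
    else pvALoopE cs (i + 1)
  else PySem.List.slice cs none (some (-1)) ++ ['b']
termination_by cs.length - i

-- odd-length loop: the same with "if i == mid: continue"
def pvALoopO (cs : List Char) (mid : Nat) (i : Nat) : List Char :=
  if h : i < cs.length then
    if i == mid then pvALoopO cs mid (i + 1)
    else if 'a' < cs[i] then
      PySem.List.slice cs none (some (i : Int)) ++ 'a' :: PySem.List.slice cs (some ((i : Int) + 1)) none
    else pvALoopO cs mid (i + 1)
  else PySem.List.slice cs none (some (-1)) ++ ['b']
termination_by cs.length - i

def breakPalindrome_v1 (palindrome : String) : String :=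
  let cs := palindrome.toList
  let n := cs.length
  if n ≤ 1 then ""
  else if n % 2 == 0 then String.ofList (pvALoopE cs 0)
  else String.ofList (pvALoopO cs (n / 2) 0)

-- ===== PORT B =====
-- the candidate "palindrome[:i] + 'a' + palindrome[i+1:]"
def pvRepl (cs : List Char) (i : Int) : List Char :=
  PySem.List.slice cs none (some i) ++ 'a' :: PySem.List.slice cs (some (i + 1)) none

-- comprehension "[palindrome[:i]+'a'+palindrome[i+1:] for i, c in enumerate(palindrome) if i != skip and c > 'a']"
-- then "min(cands) if cands else palindrome[:-1]+'b'"
def breakPalindrome_v1_alt (palindrome : String) : String :=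
  let cs := palindrome.toList
  let n := cs.length
  if n ≤ 1 then ""
  else
    let skip : Int := if n % 2 != 0 then ((n / 2 : Nat) : Int) else -1
    let cands := ((PySem.List.enumerate cs 0).filter
        (fun ic => ic.1 != skip && 'a' < ic.2)).map (fun ic => pvRepl cs ic.1)
    match PySem.List.min? cands (fun x => x) with
    | some m => String.ofList m
    | none => String.ofList (PySem.List.slice cs none (some (-1)) ++ ['b'])

-- ===== PRECONDITION & SPEC =====
def Spec_breakPalindrome_v1 (palindrome : String) (out : String) : Prop := out = breakPalindrome_v1_alt palindrome
instance (palindrome : String) (out : String) : Decidable (Spec_breakPalindrome_v1 palindrome out) := by unfold Spec_breakPalindrome_v1; infer_instance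

-- ===== CLAIM =====
def Claim_equal_breakPalindrome_v1 : Prop := ∀ (palindrome : String), Dom_breakPalindrome_v1 palindrome → Spec_breakPalindrome_v1 palindrome (breakPalindrome_v1 palindrome)

-- ===== LEMMAS AND PROOFS =====

-- Python's min of a list whose head is strictly below every other element is the head
theorem pvMin_head (x : List Char) (t : List (List Char)) (h : ∀ y ∈ t, x < y) :
    PySem.List.min? (x :: t) (fun y => y) = some x := by
  induction t with
  | nil => rfl
  | cons y t ih =>
    have hxy : ¬ (y < x) := List.lt_asymm (h y List.mem_cons_self)
    have hstep : PySem.List.min? (x :: y :: t) (fun z => z) = PySem.List.min? (x :: t) (fun z => z) := by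
      simp only [PySem.List.min?, List.foldl_cons]
      simp [hxy]
    rw [hstep]; exact ih (fun z hz => h z (List.mem_cons_of_mem _ hz))

-- the candidate at index k, in take/drop form
theorem pvRepl_eq (cs : List Char) (k : Nat) :
    pvRepl cs (k : Int) = cs.take k ++ 'a' :: cs.drop (k + 1) := by
  unfold pvRepl
  rw [PySem.List.slice_to_natCast]
  rw [show ((k : Int) + 1) = ((k + 1 : Nat) : Int) by push_cast; ring,
      PySem.List.slice_from_natCast]

-- an earlier replacement position gives a lexicographically smaller candidate
theorem pvRepl_lt (cs : List Char) (k k' : Nat) (hk' : k' < cs.length) (hkk : k < k')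
    (ha : 'a' < cs[k]'(Nat.lt_trans hkk hk')) :
    pvRepl cs (k : Int) < pvRepl cs (k' : Int) := by
  rw [pvRepl_eq, pvRepl_eq]
  obtain ⟨m, rfl⟩ : ∃ m, k' = k + (m + 1) := ⟨k' - k - 1, by omega⟩
  have hklt : k < cs.length := Nat.lt_trans hkk hk'
  have htake : cs.take (k + (m + 1)) = cs.take k ++ cs[k]'hklt ::
      (cs.drop (k + 1)).take m := by
    rw [List.take_add]
    congr 1
    rw [List.drop_eq_getElem_cons hklt, List.take_succ_cons]
  rw [htake, List.append_assoc]
  show List.lt _ _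
  rw [List.lt_iff_lex_lt]
  exact List.Lex.append_left _ (List.Lex.rel ha) _

-- A's even-length loop = case split on the first eligible (index, char) pair of the suffix
theorem pvLoopE_eq : ∀ (rest acc : List Char), (rest = [] → acc ≠ []) →
    pvALoopE (acc.reverse ++ rest) acc.length =
      match (PySem.List.enumerate rest (acc.length : Int)).filter
          (fun ic => ic.1 != (-1 : Int) && 'a' < ic.2) with
      | [] => PySem.List.slice (acc.reverse ++ rest) none (some (-1)) ++ ['b']
      | ic :: _ => pvRepl (acc.reverse ++ rest) ic.1 := by
  intro rest
  induction rest with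
  | nil =>
    intro acc hne
    rw [pvALoopE]
    simp [PySem.List.enumerate]
  | cons c rest ih =>
    intro acc hne
    rw [pvALoopE]
    have hlt : acc.length < (acc.reverse ++ c :: rest).length := by simp
    rw [dif_pos hlt]
    have hget : (acc.reverse ++ c :: rest)[acc.length]'hlt = c := by
      rw [List.getElem_append_right (by simp)]
      simp
    rw [hget, PySem.List.enumerate_cons]
    have hcond : (((acc.length : Int) != (-1 : Int)) && decide ('a' < c)) = decide ('a' < c) := by
      simp
    by_cases hc : 'a' < c
    · rw [if_pos hc]
      rw [List.filter_cons_of_pos (by simp [hc])]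
      rfl
    · rw [if_neg hc]
      rw [List.filter_cons_of_neg (by simp [hc])]
      have := ih (c :: acc) (by simp)
      simp only [List.reverse_cons, List.append_assoc, List.singleton_append, List.length_cons] at this
      rw [this]
      norm_num

-- A's odd-length loop, the same with the middle index skipped
theorem pvLoopO_eq (mid : Nat) : ∀ (rest acc : List Char), (rest = [] → acc ≠ []) →
    pvALoopO (acc.reverse ++ rest) mid acc.length =
      match (PySem.List.enumerate rest (acc.length : Int)).filter
          (fun ic => ic.1 != (mid : Int) && 'a' < ic.2) with
      | [] => PySem.List.slice (acc.reverse ++ rest) none (some (-1)) ++ ['b']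
      | ic :: _ => pvRepl (acc.reverse ++ rest) ic.1 := by
  intro rest
  induction rest with
  | nil =>
    intro acc hne
    rw [pvALoopO]
    simp [PySem.List.enumerate]
  | cons c rest ih =>
    intro acc hne
    rw [pvALoopO]
    have hlt : acc.length < (acc.reverse ++ c :: rest).length := by simp
    rw [dif_pos hlt]
    have hget : (acc.reverse ++ c :: rest)[acc.length]'hlt = c := by
      rw [List.getElem_append_right (by simp)]
      simp
    rw [hget, PySem.List.enumerate_cons]
    by_cases hm : acc.length = mid
    · rw [if_pos (by simpa using hm)]
      rw [List.filter_cons_of_neg (by simp [hm])]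
      have := ih (c :: acc) (by simp)
      simp only [List.reverse_cons, List.append_assoc, List.singleton_append, List.length_cons] at this
      rw [this]
      norm_num
    · rw [if_neg (by simpa using hm)]
      have hne' : ((acc.length : Int) != (mid : Int)) = true := by simp; omega
      by_cases hc : 'a' < c
      · rw [if_pos hc]
        rw [List.filter_cons_of_pos (by simp [hne', hc])]
        rfl
      · rw [if_neg hc]
        rw [List.filter_cons_of_neg (by simp [hc])]
        have := ih (c :: acc) (by simp)
        simp only [List.reverse_cons, List.append_assoc, List.singleton_append, List.length_cons] at this
        rw [this]
        norm_num

-- the common core: first-eligible-replacement = min of all eligible replacements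
theorem pvKey (cs : List Char) (skip : Int) :
    (match (PySem.List.enumerate cs 0).filter (fun ic => ic.1 != skip && 'a' < ic.2) with
      | [] => PySem.List.slice cs none (some (-1)) ++ ['b']
      | ic :: _ => pvRepl cs ic.1) =
    (match PySem.List.min? (((PySem.List.enumerate cs 0).filter
          (fun ic => ic.1 != skip && 'a' < ic.2)).map (fun ic => pvRepl cs ic.1)) (fun x => x) with
      | some m => m
      | none => PySem.List.slice cs none (some (-1)) ++ ['b']) := by
  cases hE : (PySem.List.enumerate cs 0).filter (fun ic => ic.1 != skip && 'a' < ic.2) with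
  | nil => rfl
  | cons e t =>
    have hmemF : ∀ y ∈ e :: t, y ∈ PySem.List.enumerate cs 0 ∧
        ((y.1 != skip && decide ('a' < y.2)) = true) := by
      intro y hy
      have : y ∈ (PySem.List.enumerate cs 0).filter (fun ic => ic.1 != skip && 'a' < ic.2) := by
        rw [hE]; exact hy
      exact ⟨List.mem_of_mem_filter this, by simpa using List.of_mem_filter this⟩
    have hshape : ∀ y ∈ e :: t, ∃ (k : Nat) (hk : k < cs.length), y = ((k : Int), cs[k]) := by
      intro y hy
      obtain ⟨k, hk, hyk⟩ := (PySem.List.mem_enumerate_iff _ _ _).mp (hmemF y hy).1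
      exact ⟨k, hk, by simpa using hyk⟩
    have hpw : (e :: t).Pairwise (fun p q => p.1 < q.1) := by
      have hsub : List.Sublist (e :: t) (PySem.List.enumerate cs 0) := by
        rw [← hE]; exact List.filter_sublist
      exact List.Pairwise.sublist hsub (PySem.List.pairwise_lt_enumerate cs 0)
    have hmin : PySem.List.min? ((e :: t).map (fun ic => pvRepl cs ic.1)) (fun x => x)
        = some (pvRepl cs e.1) := by
      rw [List.map_cons]
      apply pvMin_head
      intro y hy
      obtain ⟨e', he', rfl⟩ := List.mem_map.mp hy
      obtain ⟨k, hk, rfl⟩ := hshape e List.mem_cons_self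
      obtain ⟨k', hk', rfl⟩ := hshape e' (List.mem_cons_of_mem _ he')
      have hlt : (k : Int) < (k' : Int) := (List.pairwise_cons.mp hpw).1 _ he'
      have ha : 'a' < cs[k]'(by omega) := by
        have h2 := (hmemF _ List.mem_cons_self).2
        have := Bool.and_elim_right h2
        simpa using this
      exact pvRepl_lt cs k k' hk' (by exact_mod_cast hlt) ha
    rw [hmin]

-- ===== VERDICT =====
theorem breakPalindrome_v1_spec : Claim_equal_breakPalindrome_v1 := by
  intro p _
  show breakPalindrome_v1 p = breakPalindrome_v1_alt p
  simp only [breakPalindrome_v1, breakPalindrome_v1_alt]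
  by_cases h1 : p.toList.length ≤ 1
  · rw [if_pos h1, if_pos h1]
  · rw [if_neg h1, if_neg h1]
    have hne : p.toList ≠ [] := fun h => h1 (by simp [h])
    by_cases hp : p.toList.length % 2 = 0
    · rw [if_pos (by simpa using hp)]
      have hpL : p.length % 2 = 0 := by simpa using hp
      have hskip : (if (p.toList.length % 2 != 0) = true then ((p.toList.length / 2 : Nat) : Int) else -1) = -1 := by
        simp [hpL]
      rw [hskip]
      have hA := pvLoopE_eq p.toList [] (fun h => absurd h hne)
      simp only [List.reverse_nil, List.nil_append, List.length_nil, Nat.cast_zero] at hA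
      rw [hA, pvKey p.toList (-1)]
      cases PySem.List.min? (((PySem.List.enumerate p.toList 0).filter
          (fun ic => ic.1 != (-1 : Int) && 'a' < ic.2)).map (fun ic => pvRepl p.toList ic.1)) (fun x => x) <;> rfl
    · rw [if_neg (by simpa using hp)]
      have hp' : p.toList.length % 2 = 1 := Nat.mod_two_ne_zero.mp hp
      have hpL : p.length % 2 = 1 := by simpa using hp'
      have hskip : (if (p.toList.length % 2 != 0) = true then ((p.toList.length / 2 : Nat) : Int) else -1) = ((p.toList.length / 2 : Nat) : Int) := by
        simp [hpL]
      rw [hskip]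
      have hA := pvLoopO_eq (p.toList.length / 2) p.toList [] (fun h => absurd h hne)
      simp only [List.reverse_nil, List.nil_append, List.length_nil, Nat.cast_zero] at hA
      rw [hA, pvKey p.toList ((p.toList.length / 2 : Nat) : Int)]
      cases PySem.List.min? (((PySem.List.enumerate p.toList 0).filter
          (fun ic => ic.1 != ((p.toList.length / 2 : Nat) : Int) && 'a' < ic.2)).map (fun ic => pvRepl p.toList ic.1)) (fun x => x) <;> rfl
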